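-- pv_equiv track=rewrite | github.com/JonasLow/CS1010E | Tutorials and Revision/Week_5/Extra06/question3.py | change_value_at_index
-- ===== SOURCE A (Python) =====
-- def change_value_at_index(tpl, index, value):
--     i = 0
--     new_tup = ()
--     while i < len(tpl):
--         if i == index or i == len(tpl) + index:
--             new_tup += value,
--         else:
--             new_tup += tpl[i],
--         i += 1
--     return new_tup
-- ===== SOURCE B (Python) =====
-- def change_value_at_index(tpl, index, value):
--     lst = list(tpl)
--     if -len(tpl) <= index < len(tpl):
--         lst[index] = value
--     return tuple(lst)
-- ===== Notes on version B (the rewrite author's own statement) =====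
-- stated objective: simpler
-- what changed: Replaces the element-by-element scan (per-position two-way index test, quadratic tuple concatenation) with one guarded indexed assignment into a list copy of the tuple.
import Mathlib
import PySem

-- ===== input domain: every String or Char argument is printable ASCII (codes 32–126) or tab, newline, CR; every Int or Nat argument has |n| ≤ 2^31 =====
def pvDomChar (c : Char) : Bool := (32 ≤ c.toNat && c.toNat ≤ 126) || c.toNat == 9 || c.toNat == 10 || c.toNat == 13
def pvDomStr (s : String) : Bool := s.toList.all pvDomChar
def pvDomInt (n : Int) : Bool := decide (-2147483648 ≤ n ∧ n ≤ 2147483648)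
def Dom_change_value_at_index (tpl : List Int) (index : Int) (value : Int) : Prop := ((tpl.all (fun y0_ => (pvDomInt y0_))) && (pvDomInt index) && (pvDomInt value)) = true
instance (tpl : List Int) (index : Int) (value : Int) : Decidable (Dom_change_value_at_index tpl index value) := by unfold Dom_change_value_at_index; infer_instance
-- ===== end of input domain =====

-- B replaces A's per-element scan (with a two-way index test at every position) by one
-- guarded indexed assignment into a list copy of the tuple; objective: simpler.

-- ===== PORT A =====
-- the while loop: i counts up, new_tup accumulates one element per iteration
def cviLoopA (tpl : List Int) (index : Int) (value : Int) (i : Nat) (acc : List Int) : List Int :=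
  if i < tpl.length then
    cviLoopA tpl index value (i + 1)
      (acc ++ [if (i : Int) = index ∨ (i : Int) = (tpl.length : Int) + index then value
               else tpl.getD i 0])   -- tpl[i]; i < len(tpl) here, so Python never raises
  else acc
termination_by tpl.length - i

def change_value_at_index (tpl : List Int) (index : Int) (value : Int) : List Int :=
  cviLoopA tpl index value 0 []

-- ===== PORT B =====
-- lst = list(tpl); if -len <= index < len: lst[index] = value  (Python's native negative
-- indexing: a negative in-range index means position len+index); return tuple(lst)
def change_value_at_index_alt (tpl : List Int) (index : Int) (value : Int) : List Int :=
  if -(tpl.length : Int) ≤ index ∧ index < (tpl.length : Int) then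
    tpl.set (if index < 0 then ((tpl.length : Int) + index).toNat else index.toNat) value
  else tpl

-- ===== PRECONDITION & SPEC =====
def Spec_change_value_at_index (tpl : List Int) (index : Int) (value : Int) (out : List Int) : Prop := out = change_value_at_index_alt tpl index value
instance (tpl : List Int) (index : Int) (value : Int) (out : List Int) : Decidable (Spec_change_value_at_index tpl index value out) := by unfold Spec_change_value_at_index; infer_instance

-- ===== CLAIM (what is proved, stated in full; the proofs are below) =====
def Claim_equal_change_value_at_index : Prop := ∀ (tpl : List Int) (index : Int) (value : Int), Dom_change_value_at_index tpl index value → Spec_change_value_at_index tpl index value (change_value_at_index tpl index value)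

-- ===== LEMMAS AND PROOFS =====

-- the loop appends, position by position, the images of i, i+1, …, len-1
theorem cviLoopA_eq (tpl : List Int) (index value : Int) :
    ∀ (n i : Nat) (acc : List Int), tpl.length - i = n →
      cviLoopA tpl index value i acc =
        acc ++ (List.range' i n).map
          (fun (j : Nat) => if (j : Int) = index ∨ (j : Int) = (tpl.length : Int) + index then value
                    else tpl.getD j 0) := by
  intro n
  induction n with
  | zero =>
    intro i acc h
    rw [cviLoopA, if_neg (by omega)]
    simp
  | succ n ih =>
    intro i acc h
    rw [cviLoopA]
    have hi : i < tpl.length := by omega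
    simp only [hi, if_pos]
    rw [ih (i + 1) _ (by omega), List.range'_succ]
    simp

theorem change_value_at_index_spec : Claim_equal_change_value_at_index := by
  intro tpl index value _
  unfold Spec_change_value_at_index change_value_at_index change_value_at_index_alt
  rw [cviLoopA_eq tpl index value tpl.length 0 [] (by omega)]
  have hr : List.range' 0 tpl.length = List.range tpl.length := by
    rw [List.range_eq_range']
  rw [hr]
  simp only [List.nil_append]
  split_ifs with hguard hneg
  -- in range (negative or nonnegative index): the map is tpl.set k value at the resolved k
  case pos =>
    obtain ⟨h1, h2⟩ := hguard
    apply List.ext_getElem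
    · simp
    · intro j hj1 hj2
      simp only [List.getElem_map, List.getElem_range, List.getElem_set]
      have hjlen : j < tpl.length := by simpa using hj1
      rw [List.getD_eq_getElem tpl 0 hjlen]
      split_ifs with hc hk hk
      · rfl
      · exfalso; rcases hc with hc | hc <;> omega
      · exfalso; rw [not_or] at hc; omega
      · rfl
  case neg =>
    obtain ⟨h1, h2⟩ := hguard
    apply List.ext_getElem
    · simp
    · intro j hj1 hj2
      simp only [List.getElem_map, List.getElem_range, List.getElem_set]
      have hjlen : j < tpl.length := by simpa using hj1
      rw [List.getD_eq_getElem tpl 0 hjlen]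
      split_ifs with hc hk hk
      · rfl
      · exfalso; rcases hc with hc | hc <;> omega
      · exfalso; rw [not_or] at hc; omega
      · rfl
  -- out of range: no position ever matches, the map reproduces tpl
  case _ =>
    apply List.ext_getElem
    · simp
    · intro j hj1 hj2
      simp only [List.getElem_map, List.getElem_range]
      have hjlen : j < tpl.length := by simpa using hj1
      have hno : ¬((j : Int) = index ∨ (j : Int) = (tpl.length : Int) + index) := by
        rw [not_or]
        rw [not_and_or] at hguard
        rcases hguard with h | h <;> constructor <;> omega
      rw [if_neg hno, List.getD_eq_getElem tpl 0 hjlen]
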